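-- pv_equiv track=rewrite | github.com/blackboxprogramming/blackroad-prism-console | complete_cipher_mapper.py | build_caesar_table
-- ===== SOURCE A (Python) =====
-- def build_caesar_table(shift):
--     """Build Caesar cipher table for given shift"""
--     table = {}
--     for i in range(26):
--         plain = chr(ord('a') + i)
--         cipher = chr(ord('a') + (i + shift) % 26)
--         table[plain] = cipher
--         table[plain.upper()] = cipher.upper()
--     return table
-- ===== SOURCE B (Python) =====
-- def build_caesar_table(shift):
--     """Build Caesar cipher table for given shift"""
--     alpha = 'abcdefghijklmnopqrstuvwxyz'
--     s = shift % 26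
--     shifted = alpha[s:] + alpha[:s]
--     return {k: v
--             for p, c in zip(alpha, shifted)
--             for k, v in ((p, c), (p.upper(), c.upper()))}
-- ===== Notes on version B (the rewrite author's own statement) =====
-- stated objective: idiomatic
-- what changed: B precomputes the rotated alphabet once (reduce the shift modulo the alphabet length, then slice-and-concatenate), and builds the table with a dict comprehension zipping plain letters to shifted letters, instead of per-index chr/ord modular arithmetic inside an imperative loop.
import Mathlib
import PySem

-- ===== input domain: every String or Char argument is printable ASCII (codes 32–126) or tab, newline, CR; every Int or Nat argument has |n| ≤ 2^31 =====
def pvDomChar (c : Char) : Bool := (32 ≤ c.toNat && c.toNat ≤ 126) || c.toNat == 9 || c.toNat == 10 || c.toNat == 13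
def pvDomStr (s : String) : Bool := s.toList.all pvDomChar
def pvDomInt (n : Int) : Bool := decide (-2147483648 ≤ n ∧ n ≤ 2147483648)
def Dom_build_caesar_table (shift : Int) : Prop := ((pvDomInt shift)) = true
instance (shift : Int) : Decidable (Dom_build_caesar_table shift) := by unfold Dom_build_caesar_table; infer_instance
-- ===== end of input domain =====

-- B builds the table from a once-rotated alphabet (slice at shift % 26) zipped with the plain
-- alphabet, instead of per-index chr/ord modular arithmetic; same result, same cost.
-- ===== PORT A =====
def build_caesar_table (shift : Int) : List (String × String) :=
  (((PySem.List.pyRange 0 26 1).foldl (fun (table : PySem.Dict String String) i =>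
      let plain := String.ofList [Char.ofNat (97 + i).toNat]
      let cipher := String.ofList [Char.ofNat (97 + PySem.Int.mod (i + shift) 26).toNat]
      let table := table.insert plain cipher
      table.insert (PySem.Str.upper plain) (PySem.Str.upper cipher))
    PySem.Dict.empty).items)

-- ===== PORT B =====
def build_caesar_table_alt (shift : Int) : List (String × String) :=
  let alpha := "abcdefghijklmnopqrstuvwxyz"
  let s := PySem.Int.mod shift 26
  let shifted := PySem.List.slice alpha.toList (some s) none ++
                 PySem.List.slice alpha.toList none (some s)
  (((alpha.toList.zip shifted).flatMap (fun pc =>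
      [(String.ofList [pc.1], String.ofList [pc.2]),
       (PySem.Str.upper (String.ofList [pc.1]), PySem.Str.upper (String.ofList [pc.2]))])).foldl
    (fun (d : PySem.Dict String String) kv => d.insert kv.1 kv.2) PySem.Dict.empty).items

-- ===== PRECONDITION & SPEC =====
def Spec_build_caesar_table (shift : Int) (out : List (String × String)) : Prop := out = build_caesar_table_alt shift
instance (shift : Int) (out : List (String × String)) : Decidable (Spec_build_caesar_table shift out) := by unfold Spec_build_caesar_table; infer_instance

-- ===== CLAIM (what is proved, stated in full; the proofs are below) =====
def Claim_equal_build_caesar_table : Prop := ∀ (shift : Int), Dom_build_caesar_table shift → Spec_build_caesar_table shift (build_caesar_table shift)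

-- ===== LEMMAS AND PROOFS =====

-- char-level pair lists and the common block-builder, so all case analysis stays on chars
def pvF : Char × Char → List (String × String) := fun pc =>
  [(String.ofList [pc.1], String.ofList [pc.2]),
   (PySem.Str.upper (String.ofList [pc.1]), PySem.Str.upper (String.ofList [pc.2]))]

def pvCA (shift : Int) : List (Char × Char) :=
  (PySem.List.pyRange 0 26 1).map (fun i =>
    (Char.ofNat (97 + i).toNat, Char.ofNat (97 + PySem.Int.mod (i + shift) 26).toNat))

def pvCB (shift : Int) : List (Char × Char) :=
  "abcdefghijklmnopqrstuvwxyz".toList.zip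
    (PySem.List.slice "abcdefghijklmnopqrstuvwxyz".toList (some (PySem.Int.mod shift 26)) none ++
     PySem.List.slice "abcdefghijklmnopqrstuvwxyz".toList none (some (PySem.Int.mod shift 26)))

def pvKeys (cs : List (Char × Char)) : List Char :=
  cs.flatMap (fun pc => [pc.1, PySem.Chars.upperChar pc.1])

lemma pv_mod_shift (i shift : Int) :
    PySem.Int.mod (i + PySem.Int.mod shift 26) 26 = PySem.Int.mod (i + shift) 26 := by
  simp only [PySem.Int.mod_eq_emod_of_pos (by norm_num : (0:Int) < 26)]
  omega

lemma pv_mod_idem (a : Int) :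
    PySem.Int.mod (PySem.Int.mod a 26) 26 = PySem.Int.mod a 26 := by
  simp only [PySem.Int.mod_eq_emod_of_pos (by norm_num : (0:Int) < 26)]
  omega

lemma pvA_period (shift : Int) :
    build_caesar_table shift = build_caesar_table (PySem.Int.mod shift 26) := by
  have hr : PySem.List.pyRange 0 26 1 =
      [0,1,2,3,4,5,6,7,8,9,10,11,12,13,14,15,16,17,18,19,20,21,22,23,24,25] := by decide
  simp only [build_caesar_table, hr, List.foldl, pv_mod_shift]

lemma pvB_period (shift : Int) :
    build_caesar_table_alt shift = build_caesar_table_alt (PySem.Int.mod shift 26) := by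
  simp only [build_caesar_table_alt, pv_mod_idem]

-- a loop doing two inserts per element is the single-insert loop over the flattened pair list
lemma pv_foldl_two_inserts {α κ ν : Type} [BEq κ] (k₁ k₂ : α → κ) (v₁ v₂ : α → ν)
    (l : List α) (d : PySem.Dict κ ν) :
    l.foldl (fun d x => (d.insert (k₁ x) (v₁ x)).insert (k₂ x) (v₂ x)) d
      = (l.flatMap fun x => [(k₁ x, v₁ x), (k₂ x, v₂ x)]).foldl
          (fun d p => d.insert p.1 p.2) d := by
  induction l generalizing d with
  | nil => rfl
  | cons x xs ih =>
      simp only [List.foldl_cons, List.flatMap_cons, List.foldl_append, List.foldl_nil, ih]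

lemma pv_items_of_fresh {κ ν : Type} [BEq κ] [LawfulBEq κ] (l : List (κ × ν))
    (h : (l.map Prod.fst).Nodup) :
    ((l.foldl (fun d p => d.insert p.1 p.2) PySem.Dict.empty).items) = l := by
  rw [PySem.Dict.items_foldl_insert_fresh l Prod.fst Prod.snd PySem.Dict.empty
        (fun a _ => by simp [PySem.Dict.contains_empty]) h]
  simp [show (PySem.Dict.empty : PySem.Dict κ ν).items = [] from rfl]

lemma pv_upper_single (c : Char) :
    PySem.Str.upper (String.ofList [c]) = String.ofList [PySem.Chars.upperChar c] := by
  have h2 : (PySem.Str.upper (String.ofList [c])).toList = [PySem.Chars.upperChar c] := by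
    simp [PySem.Chars.upper, PySem.Str.toList_upper]
  have h3 := congrArg String.ofList h2
  rwa [String.ofList_toList] at h3

-- the keys of the flattened block list are the single-char strings over pvKeys
lemma pv_map_fst_flatMap (cs : List (Char × Char)) :
    ((cs.flatMap pvF).map Prod.fst) = (pvKeys cs).map (fun c => String.ofList [c]) := by
  induction cs with
  | nil => rfl
  | cons x xs ih =>
      simp only [List.flatMap_cons, List.map_append, ih, pvF, pvKeys, List.map_cons,
        List.map_nil, pv_upper_single]

lemma pv_single_inj : Function.Injective (fun c : Char => String.ofList [c]) := by
  intro a b h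
  have := congrArg String.toList h
  simpa using this

lemma pv_nodup_keys (cs : List (Char × Char)) (h : (pvKeys cs).Nodup) :
    ((cs.flatMap pvF).map Prod.fst).Nodup := by
  rw [pv_map_fst_flatMap]
  exact h.map pv_single_inj

lemma pvA_items (shift : Int) (h : ((pvCA shift).flatMap pvF).map Prod.fst |>.Nodup) :
    build_caesar_table shift = (pvCA shift).flatMap pvF := by
  calc build_caesar_table shift
      = ((PySem.List.pyRange 0 26 1).flatMap (fun i =>
          [(String.ofList [Char.ofNat (97 + i).toNat],
            String.ofList [Char.ofNat (97 + PySem.Int.mod (i + shift) 26).toNat]),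
           (PySem.Str.upper (String.ofList [Char.ofNat (97 + i).toNat]),
            PySem.Str.upper (String.ofList [Char.ofNat (97 + PySem.Int.mod (i + shift) 26).toNat]))])
          |>.foldl (fun d p => d.insert p.1 p.2) PySem.Dict.empty).items := by
        exact congrArg PySem.Dict.items
          (pv_foldl_two_inserts
            (fun i => String.ofList [Char.ofNat (97 + i).toNat])
            (fun i => PySem.Str.upper (String.ofList [Char.ofNat (97 + i).toNat]))
            (fun i => String.ofList [Char.ofNat (97 + PySem.Int.mod (i + shift) 26).toNat])
            (fun i => PySem.Str.upper (String.ofList [Char.ofNat (97 + PySem.Int.mod (i + shift) 26).toNat]))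
            (PySem.List.pyRange 0 26 1) PySem.Dict.empty)
    _ = ((pvCA shift).flatMap pvF |>.foldl (fun d p => d.insert p.1 p.2) PySem.Dict.empty).items := by
        simp only [pvCA, pvF, List.flatMap_map]
    _ = (pvCA shift).flatMap pvF := pv_items_of_fresh _ h

lemma pvB_items (shift : Int) (h : ((pvCB shift).flatMap pvF).map Prod.fst |>.Nodup) :
    build_caesar_table_alt shift = (pvCB shift).flatMap pvF := by
  exact pv_items_of_fresh ((pvCB shift).flatMap pvF) h

-- the 26 residues, checked at the char level only
set_option maxRecDepth 40000 in
set_option maxHeartbeats 1000000 in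
lemma pv_key : ∀ n ∈ List.range 26,
    pvCA (n : Int) = pvCB (n : Int) ∧ (pvKeys (pvCA (n : Int))).Nodup := by decide

-- ===== VERDICT (by name: the statement is the Claim_ definition above) =====
theorem build_caesar_table_spec : Claim_equal_build_caesar_table := by
  intro shift _
  unfold Spec_build_caesar_table
  rw [pvA_period, pvB_period]
  have h0 : 0 ≤ PySem.Int.mod shift 26 := PySem.Int.mod_nonneg shift (by norm_num)
  have h1 : PySem.Int.mod shift 26 < 26 := PySem.Int.mod_lt shift (by norm_num)
  have hs : PySem.Int.mod shift 26 = ((PySem.Int.mod shift 26).toNat : Int) :=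
    (Int.toNat_of_nonneg h0).symm
  rw [hs]
  obtain ⟨heq, hnd⟩ := pv_key (PySem.Int.mod shift 26).toNat (List.mem_range.mpr (by omega))
  rw [pvA_items _ (pv_nodup_keys _ hnd), pvB_items _ (pv_nodup_keys _ (heq ▸ hnd)), heq]
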